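-- pv_equiv track=rewrite | github.com/mitsuo0114/competitive_programming | python/atcoder/DISCO 2017/C.py | solve
-- ===== SOURCE A (Python) =====
-- import bisect
--
-- def solve(N, C, Ls):
--     Ls = sorted(Ls)
--     ans = 0
--     while len(Ls):
--         l = Ls.pop()
--         ans += 1
--
--         i = bisect.bisect_right(Ls, C - 1 - l)
--         while i > 0:
--             i -= 1
--             if l + Ls[i] + 1 <= C:
--                 Ls.pop(i)
--                 break
--     return ans
-- ===== SOURCE B (Python) =====
-- def solve(N, C, Ls):
--     xs = sorted(Ls)
--     i, j = 0, len(xs) - 1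
--     ans = 0
--     while i <= j:
--         if i < j and xs[i] + xs[j] + 1 <= C:
--             i += 1
--         j -= 1
--         ans += 1
--     return ans
-- ===== Notes on version B (the rewrite author's own statement) =====
-- stated objective: faster
-- what changed: A repeatedly mutates the sorted list (pop the max, bisect, pop the partner); B sorts once and runs a single two-pointer scan over indices, forming a pair whenever the smallest and largest remaining elements fit (any fitting partner of the current maximum is interchangeable, so the count is unchanged).
import Mathlib
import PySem

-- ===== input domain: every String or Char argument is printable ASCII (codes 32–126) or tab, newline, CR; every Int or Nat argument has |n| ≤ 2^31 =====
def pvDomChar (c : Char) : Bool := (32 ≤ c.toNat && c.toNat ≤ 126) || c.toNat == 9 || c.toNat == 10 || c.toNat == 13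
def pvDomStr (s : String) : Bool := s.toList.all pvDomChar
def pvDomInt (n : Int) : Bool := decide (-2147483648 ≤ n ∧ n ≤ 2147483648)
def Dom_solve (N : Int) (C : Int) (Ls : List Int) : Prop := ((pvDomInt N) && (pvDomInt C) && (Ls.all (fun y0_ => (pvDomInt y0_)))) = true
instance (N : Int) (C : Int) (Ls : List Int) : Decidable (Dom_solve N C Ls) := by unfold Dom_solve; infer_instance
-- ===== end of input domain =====

-- B replaces A's pop-and-bisect greedy by a sort-once two-pointer scan over indices (same return value, no list mutation).

-- ===== PORT A =====
-- inner 'while i > 0' loop of A: steps i down, pops index i and breaks when the pair fits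
def solveInnerA (C l : Int) (Ls : List Int) : Nat → List Int
  | 0 => Ls
  | i + 1 =>
    match PySem.List.pyGet? Ls (i : Int) with
    | some v => if l + v + 1 ≤ C then Ls.eraseIdx i else solveInnerA C l Ls i
    | none => Ls   -- IndexError; unreachable: i < len(Ls) at every call

-- outer 'while len(Ls)' loop: pop the last (largest) element, bisect for a partner
def solveOuterA (C : Int) (Ls : List Int) (ans : Int) : Int :=
  if h : Ls = [] then ans
  else
    let l := Ls.getLast h
    let Ls1 := Ls.dropLast
    solveOuterA C (solveInnerA C l Ls1 (PySem.List.bisectRight Ls1 (C - 1 - l))) (ans + 1)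
termination_by Ls.length
decreasing_by
  have h1 : ∀ i, (solveInnerA C l Ls1 i).length ≤ Ls1.length := by
    intro i; induction i with
    | zero => exact Nat.le_refl _
    | succ k ih =>
      simp only [solveInnerA]
      cases PySem.List.pyGet? Ls1 (k : Int) with
      | none => exact Nat.le_refl _
      | some v =>
        simp only
        split
        · exact Nat.le_trans (List.length_eraseIdx_le _ _) (Nat.le_refl _)
        · exact ih
  have h2 : Ls1.length < Ls.length := by
    have hnz : Ls.length ≠ 0 := by simpa [List.length_eq_zero_iff] using h
    simp only [Ls1, List.length_dropLast]; omega
  exact Nat.lt_of_le_of_lt (h1 _) h2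

def solve (N : Int) (C : Int) (Ls : List Int) : Int :=
  solveOuterA C (PySem.List.sorted Ls (fun x => x)) 0

-- ===== PORT B =====
-- the 'while i <= j' two-pointer loop of B
def solveTP (C : Int) (xs : List Int) (i j ans : Int) : Int :=
  if h : i ≤ j then
    solveTP C xs
      (if i < j ∧ PySem.List.pyGetD xs i 0 + PySem.List.pyGetD xs j 0 + 1 ≤ C then i + 1 else i)
      (j - 1) (ans + 1)
  else ans
termination_by (j + 1 - i).toNat
decreasing_by split_ifs <;> omega

def solve_alt (N : Int) (C : Int) (Ls : List Int) : Int :=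
  let xs := PySem.List.sorted Ls (fun x => x)
  solveTP C xs 0 ((xs.length : Int) - 1) 0

-- ===== PRECONDITION & SPEC =====
def Spec_solve (N : Int) (C : Int) (Ls : List Int) (out : Int) : Prop := out = solve_alt N C Ls
instance (N : Int) (C : Int) (Ls : List Int) (out : Int) : Decidable (Spec_solve N C Ls out) := by unfold Spec_solve; infer_instance

-- ===== CLAIM (what is proved, stated in full; the proofs are below) =====
def Claim_equal_solve : Prop := ∀ (N : Int) (C : Int) (Ls : List Int), Dom_solve N C Ls → Spec_solve N C Ls (solve N C Ls)

-- ===== LEMMAS AND PROOFS =====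

-- the common abstract recursion both loops compute: on an ascending list, take the last
-- element, pair it with the first element when the pair fits, and recurse
def fTP (C : Int) (xs : List Int) : Int :=
  if h : xs = [] then 0
  else
    match xs.dropLast.head? with
    | none => 1
    | some m => if m + xs.getLast h + 1 ≤ C then 1 + fTP C xs.dropLast.tail else 1 + fTP C xs.dropLast
termination_by xs.length
decreasing_by
  · have : xs.length ≠ 0 := by simpa [List.length_eq_zero_iff] using h
    have h1 : xs.dropLast.tail.length = xs.dropLast.length - 1 := List.length_tail
    have h2 : xs.dropLast.length = xs.length - 1 := List.length_dropLast
    omega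
  · have : xs.length ≠ 0 := by simpa [List.length_eq_zero_iff] using h
    have h2 : xs.dropLast.length = xs.length - 1 := List.length_dropLast
    omega

lemma fTP_nil (C : Int) : fTP C [] = 0 := by simp [fTP]

lemma fTP_concat (C : Int) (ys : List Int) (q : Int) :
    fTP C (ys ++ [q]) =
      match ys.head? with
      | none => 1
      | some m => if m + q + 1 ≤ C then 1 + fTP C ys.tail else 1 + fTP C ys := by
  rw [fTP]
  simp

lemma fTP_singleton (C : Int) (x : Int) : fTP C [x] = 1 := by
  rw [show [x] = ([] : List Int) ++ [x] by simp, fTP_concat]; simp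

lemma fTP_swap_nil (C : Int) (pre : List Int) (a b : Int) (hab : a ≤ b)
    (hcompat : ∀ z ∈ pre, b + z + 1 ≤ C) :
    fTP C (pre ++ [a]) = fTP C (pre ++ [b]) := by
  rw [fTP_concat, fTP_concat]
  cases pre with
  | nil => simp
  | cons p pre' =>
    have hp : b + p + 1 ≤ C := hcompat p (by simp)
    have h1 : p + a + 1 ≤ C := by omega
    have h2 : p + b + 1 ≤ C := by omega
    simp [h1, h2]

-- swapping one element for a larger one that still fits with everything does not change fTP
lemma fTP_swap (C : Int) : ∀ (n : Nat) (post pre : List Int) (a b : Int), post.length ≤ n →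
    a ≤ b →
    (∀ z ∈ pre ++ b :: post, b + z + 1 ≤ C) →
    fTP C (pre ++ a :: post) = fTP C (pre ++ b :: post) := by
  intro n
  induction n with
  | zero =>
    intro post pre a b hlen hab hcompat
    have hpost : post = [] := List.length_eq_zero_iff.mp (Nat.le_zero.mp hlen)
    subst hpost
    exact fTP_swap_nil C pre a b hab (fun z hz => hcompat z (by simp [hz]))
  | succ n ih =>
    intro post pre a b hlen hab hcompat
    rcases List.eq_nil_or_concat post with rfl | ⟨post₂, q, rfl⟩
    · exact fTP_swap_nil C pre a b hab (fun z hz => hcompat z (by simp [hz]))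
    · simp only [List.concat_eq_append] at hlen hcompat ⊢
      rw [show pre ++ a :: (post₂ ++ [q]) = (pre ++ a :: post₂) ++ [q] by simp,
          show pre ++ b :: (post₂ ++ [q]) = (pre ++ b :: post₂) ++ [q] by simp,
          fTP_concat, fTP_concat]
      have hq : b + q + 1 ≤ C := hcompat q (by simp)
      have hlen₂ : post₂.length ≤ n := by simp at hlen; omega
      cases pre with
      | nil =>
        simp only [List.nil_append, List.head?_cons, List.tail_cons]
        have ha : a + q + 1 ≤ C := by omega
        have hb : b + q + 1 ≤ C := by omega
        simp [ha, hb]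
      | cons p pre' =>
        simp only [List.cons_append, List.head?_cons, List.tail_cons]
        by_cases hc : p + q + 1 ≤ C
        · rw [if_pos hc, if_pos hc,
              ih post₂ pre' a b hlen₂ hab
                (fun z hz => hcompat z (by simp at hz ⊢; tauto))]
        · rw [if_neg hc, if_neg hc]
          have := ih post₂ (p :: pre') a b hlen₂ hab
                (fun z hz => hcompat z (by simp at hz ⊢; tauto))
          simp only [List.cons_append] at this
          rw [this]

-- erasing any element that fits with everything counts the same as erasing the head
lemma fTP_eraseIdx_eq_tail (C : Int) : ∀ (k : Nat) (xs : List Int), xs.Pairwise (· ≤ ·) →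
    (hk : k < xs.length) → (∀ z ∈ xs, xs[k] + z + 1 ≤ C) →
    fTP C (xs.eraseIdx k) = fTP C xs.tail := by
  intro k
  induction k with
  | zero => intro xs _ _ _; rw [List.eraseIdx_zero]
  | succ k ih =>
    intro xs hpw hk hcompat
    have hk' : k < xs.length := by omega
    have e1 : xs.eraseIdx (k + 1) = xs.take k ++ xs[k] :: xs.drop (k + 2) := by
      rw [List.eraseIdx_eq_take_drop_succ, List.take_add_one, List.getElem?_eq_getElem hk']
      simp only [Option.toList_some, List.append_assoc, List.singleton_append]
    have e2 : xs.eraseIdx k = xs.take k ++ xs[k + 1] :: xs.drop (k + 2) := by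
      rw [List.eraseIdx_eq_take_drop_succ, List.drop_eq_getElem_cons hk]
    have hab : xs[k] ≤ xs[k + 1] :=
      List.pairwise_iff_getElem.mp hpw k (k + 1) hk' hk (by omega)
    have hswap : fTP C (xs.eraseIdx (k + 1)) = fTP C (xs.eraseIdx k) := by
      rw [e1, e2]
      refine fTP_swap C (xs.drop (k + 2)).length (xs.drop (k + 2)) (xs.take k) xs[k] xs[k + 1]
        (Nat.le_refl _) hab (fun z hz => hcompat z ?_)
      rw [← e2] at hz
      exact List.Sublist.mem hz (List.eraseIdx_sublist xs k)
    rw [hswap]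
    exact ih xs hpw hk' (fun z hz => by have := hcompat z hz; omega)

lemma solveOuterA_eq (C : Int) : ∀ (n : Nat) (Ls : List Int), Ls.length ≤ n →
    Ls.Pairwise (· ≤ ·) → ∀ ans, solveOuterA C Ls ans = ans + fTP C Ls := by
  intro n
  induction n with
  | zero =>
    intro Ls hlen _ ans
    have : Ls = [] := List.length_eq_zero_iff.mp (Nat.le_zero.mp hlen)
    subst this
    rw [solveOuterA, fTP_nil]; simp
  | succ n ih =>
    intro Ls hlen hpw ans
    rcases List.eq_nil_or_concat Ls with rfl | ⟨rest, l, rfl⟩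
    · rw [solveOuterA, fTP_nil]; simp
    · simp only [List.concat_eq_append] at hlen hpw ⊢
      rw [solveOuterA]
      rw [dif_neg (by simp)]
      simp only [List.getLast_concat, List.dropLast_concat]
      have hpwr : rest.Pairwise (· ≤ ·) := (List.pairwise_append.mp hpw).1
      have hle : ∀ z ∈ rest, z ≤ l := by
        intro z hz
        exact (List.pairwise_append.mp hpw).2.2 z hz l (by simp)
      have hlenr : rest.length ≤ n := by simp at hlen; omega
      obtain ⟨hblen, hblt, hbgt⟩ := PySem.List.bisectRight_spec rest (C - 1 - l) hpwr
      rw [fTP_concat]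
      cases hbi : PySem.List.bisectRight rest (C - 1 - l) with
      | zero =>
        rw [hbi] at hblen hblt hbgt
        have hinner : solveInnerA C l rest 0 = rest := rfl
        rw [hinner, ih rest hlenr hpwr (ans + 1)]
        cases rest with
        | nil => rw [fTP_nil]; simp
        | cons r0 rest' =>
          have h0 : C - 1 - l < r0 := hbgt 0 (by simp) (by omega)
          have : ¬ (r0 + l + 1 ≤ C) := by omega
          simp only [List.head?_cons, this, if_false]
          omega
      | succ k =>
        rw [hbi] at hblen hblt hbgt
        have hk : k < rest.length := by omega
        have hvk : rest[k] ≤ C - 1 - l := hblt k hk (by omega)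
        have hinner : solveInnerA C l rest (k + 1) = rest.eraseIdx k := by
          simp only [solveInnerA, PySem.List.pyGet?_natCast, List.getElem?_eq_getElem hk]
          rw [if_pos (by omega)]
        rw [hinner, ih (rest.eraseIdx k) (Nat.le_trans (List.length_eraseIdx_le _ _) hlenr)
              (List.Pairwise.sublist (List.eraseIdx_sublist rest k) hpwr) (ans + 1)]
        have hcompat : ∀ z ∈ rest, rest[k] + z + 1 ≤ C := by
          intro z hz
          have := hle z hz
          omega
        rw [fTP_eraseIdx_eq_tail C k rest hpwr hk hcompat]
        cases rest with
        | nil => exact absurd hk (by simp)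
        | cons r0 rest' =>
          have h0 : r0 + l + 1 ≤ C := by
            have : (r0 :: rest')[0] ≤ C - 1 - l := hblt 0 (by simp) (by omega)
            simp at this
            omega
          simp only [List.head?_cons, List.tail_cons, if_pos h0]
          omega

lemma solveTP_eq (C : Int) (xs : List Int) : ∀ (n : Nat) (i j ans : Int), (j + 1 - i).toNat ≤ n →
    0 ≤ i → j < (xs.length : Int) →
    solveTP C xs i j ans = ans + fTP C ((xs.take (j + 1).toNat).drop i.toNat) := by
  intro n
  induction n with
  | zero =>
    intro i j ans hn h0 hj
    have hij : ¬ i ≤ j := by omega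
    rw [solveTP, dif_neg hij,
        List.drop_eq_nil_iff.mpr (by rw [List.length_take]; omega), fTP_nil]
    simp
  | succ n ih =>
    intro i j ans hn h0 hj
    by_cases hij : i ≤ j
    · rw [solveTP, dif_pos hij]
      have hi_lt : i < (xs.length : Int) := lt_of_le_of_lt hij hj
      have hiN : i.toNat < xs.length := by omega
      have hjN : j.toNat < xs.length := by omega
      have hgi : PySem.List.pyGetD xs i 0 = xs[i.toNat] := PySem.List.pyGetD_eq_getElem xs 0 h0 hi_lt
      have hgj : PySem.List.pyGetD xs j 0 = xs[j.toNat] :=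
        PySem.List.pyGetD_eq_getElem xs 0 (by omega) hj
      by_cases hij2 : i < j
      · have hab : i.toNat < j.toNat := by omega
        have e2 : List.drop i.toNat (List.take j.toNat xs)
            = xs[i.toNat] :: List.drop (i.toNat + 1) (List.take j.toNat xs) := by
          rw [List.drop_eq_getElem_cons (by rw [List.length_take]; omega)]
          congr 1
          simp [List.getElem_take]
        have e1 : List.drop i.toNat (List.take (j + 1).toNat xs)
            = List.drop i.toNat (List.take j.toNat xs) ++ [xs[j.toNat]] := by
          rw [show (j + 1).toNat = j.toNat + 1 by omega, List.take_add_one,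
              List.getElem?_eq_getElem hjN,
              List.drop_append_of_le_length (by rw [List.length_take]; omega)]
          simp
        rw [e1, e2, fTP_concat]
        simp only [List.head?_cons, List.tail_cons]
        by_cases hc : xs[i.toNat] + xs[j.toNat] + 1 ≤ C
        · rw [if_pos ⟨hij2, by rw [hgi, hgj]; exact hc⟩, if_pos hc,
              ih (i + 1) (j - 1) (ans + 1) (by omega) (by omega) (by omega),
              show (j - 1 + 1).toNat = j.toNat by omega,
              show (i + 1).toNat = i.toNat + 1 by omega]
          omega
        · rw [if_neg (fun hcontra => hc (by rw [hgi, hgj] at hcontra; exact hcontra.2)),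
              if_neg hc,
              ih i (j - 1) (ans + 1) (by omega) h0 (by omega),
              show (j - 1 + 1).toNat = j.toNat by omega, e2]
          omega
      · have hii : i = j := le_antisymm hij (not_lt.mp hij2)
        rw [if_neg (fun hcontra => hij2 hcontra.1),
            ih i (j - 1) (ans + 1) (by omega) h0 (by omega),
            List.drop_eq_nil_iff.mpr (by rw [List.length_take]; omega), fTP_nil]
        have e : List.drop i.toNat (List.take (j + 1).toNat xs) = [xs[i.toNat]] := by
          rw [show (j + 1).toNat = i.toNat + 1 by omega, List.drop_take,
              show i.toNat + 1 - i.toNat = 1 by omega,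
              List.drop_eq_getElem_cons hiN]
          rfl
        rw [e, fTP_singleton]
        omega
    · rw [solveTP, dif_neg hij,
          List.drop_eq_nil_iff.mpr (by rw [List.length_take]; omega), fTP_nil]
      simp

-- ===== VERDICT (by name: the statement is the Claim_ definition above) =====
theorem solve_spec : Claim_equal_solve := by
  intro N C Ls _
  unfold Spec_solve solve solve_alt
  set s := PySem.List.sorted Ls (fun x => x) with hs
  have hpw : s.Pairwise (· ≤ ·) := PySem.List.sorted_pairwise Ls (fun x => x)
  rw [solveOuterA_eq C s.length s (Nat.le_refl _) hpw 0,
      solveTP_eq C s s.length 0 ((s.length : Int) - 1) 0 (by omega) (by omega) (by omega)]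
  simp
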